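-- pv_equiv track=rewrite | github.com/donEnno/gamma_delta | kmer_approach.py | fill_dicts
-- ===== SOURCE A (Python) =====
-- def fill_dicts(list_of_dictionaries):
--     """
--     Takes two minutes for all generated kmers.
--
--     :param list_of_dictionaries:
--     :return: list of tuples that are equal in keys but differ in values
--     """
--     updated_kmer_counts = []
--
--     for target in list_of_dictionaries:
--
--         for query in list_of_dictionaries:
--
--             if target == query:
--                 continue
--
--             else:
--                 for kmer in query.keys():
--
--                     if kmer in target.keys():
--                         continue
--                     else:
--                         target[kmer] = 0
--
--         target = sorted(target.items(), key=lambda x: x[0], reverse=True)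
--         updated_kmer_counts.append(target)
--
--     return updated_kmer_counts
-- ===== SOURCE B (Python) =====
-- def fill_dicts(list_of_dictionaries):
--     union = set()
--     for d in list_of_dictionaries:
--         for kmer in d.keys():
--             union.add(kmer)
--     sorted_keys = sorted(union, reverse=True)
--
--     updated_kmer_counts = []
--     for d in list_of_dictionaries:
--         for kmer in sorted_keys:
--             if kmer not in d:
--                 d[kmer] = 0
--         updated_kmer_counts.append([(kmer, d[kmer]) for kmer in sorted_keys])
--     return updated_kmer_counts
-- ===== Notes on version B (the rewrite author's own statement) =====
-- stated objective: faster
-- what changed: B builds the union of all kmer keys in one pass and sorts it once, then fills each dict and emits its row by mapping over that single sorted key list, instead of A's per-target rescan of every other dict (with dict-equality tests) followed by a per-target sort.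
import Mathlib
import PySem

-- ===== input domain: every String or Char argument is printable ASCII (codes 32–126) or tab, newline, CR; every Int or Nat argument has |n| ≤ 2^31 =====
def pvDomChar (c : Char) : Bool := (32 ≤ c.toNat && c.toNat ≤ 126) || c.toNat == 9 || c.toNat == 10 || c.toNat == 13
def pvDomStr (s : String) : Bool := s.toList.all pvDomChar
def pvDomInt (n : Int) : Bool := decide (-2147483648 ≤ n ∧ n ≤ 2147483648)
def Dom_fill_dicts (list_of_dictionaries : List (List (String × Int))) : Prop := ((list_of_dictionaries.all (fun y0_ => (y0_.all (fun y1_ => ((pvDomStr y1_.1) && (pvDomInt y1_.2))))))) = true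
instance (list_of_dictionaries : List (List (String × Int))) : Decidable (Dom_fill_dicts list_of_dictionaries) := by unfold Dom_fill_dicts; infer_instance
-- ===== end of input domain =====

-- B computes the union of all keys and sorts it ONCE, then fills and reads each dict along that
-- one sorted key list, instead of A's per-target rescan of every other dict and per-target sort.
-- Both A and B mutate the input dicts in place (adding missing keys with value 0); the theorems
-- below are about the RETURN value only (the filled key sets agree, but the insertion ORDER of
-- the added keys may differ between A and B).

-- ===== PORT A =====
-- Python's dict '==' (order-insensitive key/value comparison; exact for dicts with unique keys)
def pyDictEq (t q : PySem.Dict String Int) : Bool :=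
  t.size == q.size && t.items.all (fun p => q.get? p.1 == some p.2)

-- 'if target == query: continue / else: for kmer in query.keys(): if kmer in target … else target[kmer] = 0'
def fillFrom (t q : PySem.Dict String Int) : PySem.Dict String Int :=
  if pyDictEq t q then t
  else q.items.foldl (fun t p => if t.contains p.1 then t else t.insert p.1 0) t

-- the two loops over the mutating list are folded by index so that the aliasing is exact:
-- when the query IS the target (j = i) the query is the live, already part-filled target
def fill_dicts (list_of_dictionaries : List (List (String × Int))) : List (List (String × Int)) :=
  let ds0 := list_of_dictionaries.map (fun l => PySem.Dict.ofList l)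
  let n := ds0.length
  ((List.range n).foldl
    (fun (st : List (PySem.Dict String Int) × List (List (String × Int))) i =>
      let ds := st.1
      let t := (List.range n).foldl
        (fun t j => fillFrom t (if j = i then t else ds.getD j PySem.Dict.empty))
        (ds.getD i PySem.Dict.empty)
      (ds.set i t, st.2 ++ [PySem.List.sorted t.items (fun x => x.1) true]))
    (ds0, [])).2

-- ===== PORT B =====
def fill_dicts_alt (list_of_dictionaries : List (List (String × Int))) : List (List (String × Int)) :=
  let ds0 := list_of_dictionaries.map (fun l => PySem.Dict.ofList l)
  let union : PySem.Set String :=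
    ds0.foldl (fun s d => d.keys.foldl (fun s k => PySem.Set.add s k) s) PySem.Set.empty
  let sortedKeys := PySem.List.sorted union (fun k => k) true
  ds0.foldl (fun (out : List (List (String × Int))) d =>
      let d' := sortedKeys.foldl (fun d k => if d.contains k then d else d.insert k 0) d
      -- 'd[kmer]': the key is always present after the fill, so getD's default is never used
      out ++ [sortedKeys.map (fun k => (k, d'.getD k 0))]) []

-- ===== PRECONDITION & SPEC =====
def Spec_fill_dicts (list_of_dictionaries : List (List (String × Int))) (out : List (List (String × Int))) : Prop := out = fill_dicts_alt list_of_dictionaries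
instance (list_of_dictionaries : List (List (String × Int))) (out : List (List (String × Int))) : Decidable (Spec_fill_dicts list_of_dictionaries out) := by unfold Spec_fill_dicts; infer_instance

-- ===== CLAIM (what is proved, stated in full; the proofs are below) =====
def Claim_equal_fill_dicts : Prop := ∀ (list_of_dictionaries : List (List (String × Int))), Dom_fill_dicts list_of_dictionaries → Spec_fill_dicts list_of_dictionaries (fill_dicts list_of_dictionaries)

-- ===== LEMMAS AND PROOFS =====

-- the union of all keys, exactly as B builds it
def uKeys (ds : List (PySem.Dict String Int)) : PySem.Set String :=
  ds.foldl (fun s d => d.keys.foldl (fun s k => PySem.Set.add s k) s) PySem.Set.empty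

-- what both programs turn each original dict into: original values on original keys, 0 elsewhere on U
def fillSpec (d : PySem.Dict String Int) (U : List String) (x : String) : Option Int :=
  if d.contains x then d.get? x else if x ∈ U then some 0 else none

-- one output row, expressed over B's sorted union key list
def rowSpec (U : List String) (d : PySem.Dict String Int) : List (String × Int) :=
  (PySem.List.sorted U (fun k => k) true).map (fun k => (k, if d.contains k then d.getD k 0 else 0))

-- A's outer-loop body, named so the induction can talk about it
def stepA (n : Nat) (st : List (PySem.Dict String Int) × List (List (String × Int))) (i : Nat) :
    List (PySem.Dict String Int) × List (List (String × Int)) :=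
  let ds := st.1
  let t := (List.range n).foldl
    (fun t j => fillFrom t (if j = i then t else ds.getD j PySem.Dict.empty))
    (ds.getD i PySem.Dict.empty)
  (ds.set i t, st.2 ++ [PySem.List.sorted t.items (fun x => x.1) true])

theorem mem_uKeys_aux (ds : List (PySem.Dict String Int)) (s : PySem.Set String) (x : String) :
    x ∈ ds.foldl (fun s d => d.keys.foldl (fun s k => PySem.Set.add s k) s) s ↔
      x ∈ s ∨ ∃ d ∈ ds, x ∈ d.keys := by
  induction ds generalizing s with
  | nil => simp
  | cons d ds ih =>
    simp only [List.foldl_cons, ih]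
    rw [PySem.Set.mem_foldl_add (f := fun k => k)]
    constructor
    · rintro (⟨h | ⟨k, hk, rfl⟩⟩ | h)
      · exact .inl h
      · exact .inr ⟨d, by simp, hk⟩
      · obtain ⟨e, he, hx⟩ := h; exact .inr ⟨e, by simp [he], hx⟩
    · rintro (h | ⟨e, he, hx⟩)
      · exact .inl (.inl h)
      · rcases List.mem_cons.1 he with rfl | he
        · exact .inl (.inr ⟨x, hx, rfl⟩)
        · exact .inr ⟨e, he, hx⟩

theorem mem_uKeys (ds : List (PySem.Dict String Int)) (x : String) :
    x ∈ uKeys ds ↔ ∃ d ∈ ds, x ∈ d.keys := by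
  unfold uKeys
  rw [mem_uKeys_aux]
  simp [PySem.Set.empty]

theorem nodup_uKeys (ds : List (PySem.Dict String Int)) : (uKeys ds).Nodup := by
  unfold uKeys
  generalize hs : PySem.Set.empty = s
  have hnd : s.Nodup := by rw [← hs]; exact List.nodup_nil
  clear hs
  induction ds generalizing s with
  | nil => exact hnd
  | cons d ds ih =>
    refine ih _ ?_
    show (List.foldl (fun s k => PySem.Set.add s ((fun y => y) k)) s d.keys).Nodup
    rw [← PySem.Set.update_map_eq_foldl_add]
    simpa using PySem.Set.nodup_update (xs := d.keys.map (fun y => y)) (s := s) hnd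

theorem fillKeys_get? (ks : List String) (t : PySem.Dict String Int) (x : String) :
    (ks.foldl (fun t k => if t.contains k then t else t.insert k 0) t).get? x =
      if t.contains x then t.get? x else if x ∈ ks then some 0 else none := by
  induction ks generalizing t with
  | nil =>
    by_cases hx : t.contains x = true
    · simp [hx]
    · simp [hx, PySem.Dict.get?_eq_none_iff_contains]
  | cons k ks ih =>
    simp only [List.foldl_cons]
    by_cases hk : t.contains k = true
    · rw [if_pos hk, ih]
      by_cases hx : t.contains x = true
      · simp [hx]
      · have hxk : x ≠ k := fun h => by subst h; exact absurd hk (by simp [hx])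
        simp [hx, hxk]
    · rw [if_neg hk, ih, PySem.Dict.get?_insert, PySem.Dict.contains_insert]
      by_cases hxk : x = k
      · subst hxk
        simp [hk]
      · simp [hxk]

theorem fillKeys_nodup (ks : List String) (t : PySem.Dict String Int) (h : t.keys.Nodup) :
    (ks.foldl (fun t k => if t.contains k then t else t.insert k 0) t).keys.Nodup := by
  induction ks generalizing t with
  | nil => exact h
  | cons k ks ih =>
    simp only [List.foldl_cons]
    split
    · exact ih _ h
    · exact ih _ (PySem.Dict.nodup_keys_insert _ _ _ h)

theorem pyDictEq_contains (t q : PySem.Dict String Int) (h : pyDictEq t q = true)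
    (hnt : t.keys.Nodup) (x : String) (hx : q.contains x = true) :
    t.contains x = true := by
  unfold pyDictEq at h
  rw [Bool.and_eq_true, beq_iff_eq] at h
  obtain ⟨hsz, hall⟩ := h
  rw [List.all_eq_true] at hall
  have hsub : t.keys ⊆ q.keys := by
    intro k hk
    obtain ⟨p, hp, rfl⟩ := List.mem_map.1 hk
    have h1 := hall p hp
    rw [beq_iff_eq] at h1
    rw [← PySem.Dict.contains_iff_mem_keys, PySem.Dict.contains_eq_isSome_get?, h1]
    rfl
  have hlen : q.keys.length ≤ t.keys.length := by
    have h2 : t.items.length = q.items.length := hsz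
    simpa [PySem.Dict.keys] using h2.ge
  have hperm := (List.subperm_of_subset hnt hsub).perm_of_length_le hlen
  exact (PySem.Dict.contains_iff_mem_keys t x).2
    (hperm.mem_iff.2 ((PySem.Dict.contains_iff_mem_keys q x).1 hx))

theorem fillFrom_get? (t q : PySem.Dict String Int) (hnt : t.keys.Nodup) (x : String) :
    (fillFrom t q).get? x =
      if t.contains x then t.get? x else if q.contains x then some 0 else none := by
  unfold fillFrom
  by_cases he : pyDictEq t q = true
  · rw [if_pos he]
    by_cases hx : t.contains x = true
    · simp [hx]
    · have hq : q.contains x = false := by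
        cases hc : q.contains x
        · rfl
        · exact absurd (pyDictEq_contains t q he hnt x hc) hx
      rw [if_neg hx, hq, if_neg (by simp)]
      exact (PySem.Dict.get?_eq_none_iff_contains t x).2 ((Bool.not_eq_true _).mp hx)
  · rw [if_neg he]
    have hrw : q.items.foldl (fun t p => if t.contains p.1 then t else t.insert p.1 0) t
        = q.keys.foldl (fun t k => if t.contains k then t else t.insert k 0) t := by
      rw [show q.keys = q.items.map (fun p => p.1) from rfl, List.foldl_map]
    rw [hrw, fillKeys_get?]
    by_cases hx : t.contains x = true
    · simp [hx]
    · simp [hx, PySem.Dict.contains_iff_mem_keys]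

theorem fillFrom_nodup (t q : PySem.Dict String Int) (hnt : t.keys.Nodup) :
    (fillFrom t q).keys.Nodup := by
  unfold fillFrom
  split
  · exact hnt
  · rw [show q.items.foldl (fun t p => if t.contains p.1 then t else t.insert p.1 0) t
        = q.keys.foldl (fun t k => if t.contains k then t else t.insert k 0) t by
      rw [show q.keys = q.items.map (fun p => p.1) from rfl, List.foldl_map]]
    exact fillKeys_nodup _ _ hnt

-- A's inner query loop: original values survive; a key of any (≠ i)-query joins with value 0
theorem inner_loop (ds : List (PySem.Dict String Int)) (i : Nat) (js : List Nat)
    (t : PySem.Dict String Int) (hnt : t.keys.Nodup) :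
    (js.foldl (fun t j => fillFrom t (if j = i then t else ds.getD j PySem.Dict.empty)) t).keys.Nodup ∧
    ∀ x, (js.foldl (fun t j => fillFrom t (if j = i then t else ds.getD j PySem.Dict.empty)) t).get? x =
      if t.contains x then t.get? x
      else if js.any (fun j => decide (j ≠ i) && (ds.getD j PySem.Dict.empty).contains x) then some 0
      else none := by
  induction js generalizing t with
  | nil =>
    refine ⟨hnt, fun x => ?_⟩
    by_cases hx : t.contains x = true
    · simp [hx]
    · simp [hx, PySem.Dict.get?_eq_none_iff_contains]
  | cons j js ih =>
    simp only [List.foldl_cons, List.any_cons]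
    have hnt' : (fillFrom t (if j = i then t else ds.getD j PySem.Dict.empty)).keys.Nodup :=
      fillFrom_nodup t _ hnt
    obtain ⟨hn, hg⟩ := ih _ hnt'
    refine ⟨hn, fun x => ?_⟩
    rw [hg x]
    have hgf := fillFrom_get? t (if j = i then t else ds.getD j PySem.Dict.empty) hnt x
    have hcf : (fillFrom t (if j = i then t else ds.getD j PySem.Dict.empty)).contains x
        = (t.contains x || (if j = i then t else ds.getD j PySem.Dict.empty).contains x) := by
      rw [PySem.Dict.contains_eq_isSome_get?, hgf]
      by_cases h1 : t.contains x = true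
      · rw [h1, if_pos rfl, Bool.true_or, ← PySem.Dict.contains_eq_isSome_get?, h1]
      · rw [(Bool.not_eq_true _).mp h1, Bool.false_or, if_neg (by simp)]
        cases hc : (if j = i then t else ds.getD j PySem.Dict.empty).contains x <;> rfl
    simp only [List.getD_eq_getElem?_getD] at hgf hcf ⊢
    by_cases hji : j = i
    · subst hji
      rw [if_pos rfl] at hgf hcf ⊢
      by_cases h1 : t.contains x = true
      · simp [hcf, hgf, h1]
      · simp [hcf, (Bool.not_eq_true _).mp h1]
    · rw [if_neg hji] at hgf hcf ⊢
      by_cases h1 : t.contains x = true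
      · simp [hcf, hgf, h1]
      · by_cases hc : (ds[j]?.getD PySem.Dict.empty).contains x = true
        · simp [hcf, hgf, (Bool.not_eq_true _).mp h1, hc, hji]
        · simp [hcf, (Bool.not_eq_true _).mp h1, (Bool.not_eq_true _).mp hc, hji]

-- a dict with key set U and the filled values, sorted descending by key, is B's row
theorem row_eq (U : List String) (hU : U.Nodup) (T d : PySem.Dict String Int)
    (hT : T.keys.Nodup)
    (hmem : ∀ x, T.contains x = true ↔ x ∈ U)
    (hg : ∀ x, T.get? x = fillSpec d U x) :
    PySem.List.sorted T.items (fun p => p.1) true = rowSpec U d := by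
  unfold rowSpec
  set SK := PySem.List.sorted U (fun k => k) true with hSK
  have hSKperm : SK.Perm U := PySem.List.sorted_perm U _ true
  have hSKnodup : SK.Nodup := (hSKperm.nodup_iff).2 hU
  have hkeysU : T.keys.Perm U := by
    rw [List.perm_ext_iff_of_nodup hT hU]
    intro a
    rw [← PySem.Dict.contains_iff_mem_keys]
    exact hmem a
  have hval : ∀ k ∈ SK, (k, if d.contains k = true then d.getD k 0 else 0) = (k, T.getD k 0) := by
    intro k hk
    have hkU : k ∈ U := hSKperm.subset hk
    rw [PySem.Dict.getD_eq_get?_getD (d := T), hg k]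
    unfold fillSpec
    by_cases hc : d.contains k = true
    · simp [hc, PySem.Dict.getD_eq_get?_getD]
    · simp [(Bool.not_eq_true _).mp hc, hkU]
  refine PySem.List.sorted_rev_eq_of_perm_of_pairwise_gt _ _ _ ?_ ?_
  · rw [List.map_congr_left hval, PySem.Dict.items_eq_map_keys T hT 0]
    exact (hSKperm.trans hkeysU.symm).map _
  · have hle : List.Pairwise (fun a b => (b:String) ≤ a) SK := PySem.List.sorted_pairwise_rev U _
    have hne : List.Pairwise (fun a b => (a:String) ≠ b) SK := hSKnodup
    have hlt : List.Pairwise (fun a b : String => b < a) SK := by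
      refine (hle.and hne).imp ?_
      rintro a b ⟨h1, h2⟩
      exact lt_of_le_of_ne h1 (Ne.symm h2)
    rw [List.pairwise_map]
    simpa using hlt

-- every original dict's keys lie in the union
theorem contains0_mem_uKeys (ds0 : List (PySem.Dict String Int)) (j : Nat) (x : String)
    (h : (ds0.getD j PySem.Dict.empty).contains x = true) : x ∈ uKeys ds0 := by
  rw [mem_uKeys]
  by_cases hj : j < ds0.length
  · refine ⟨ds0[j], List.getElem_mem hj, ?_⟩
    rw [← PySem.Dict.contains_iff_mem_keys]
    rw [List.getD_eq_getElem?_getD, List.getElem?_eq_getElem hj] at h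
    exact h
  · rw [List.getD_eq_getElem?_getD, List.getElem?_eq_none (by omega)] at h
    simp [PySem.Dict.contains, PySem.Dict.empty] at h

theorem exists_contains0_of_mem_uKeys (ds0 : List (PySem.Dict String Int)) (x : String)
    (h : x ∈ uKeys ds0) : ∃ j, j < ds0.length ∧ (ds0.getD j PySem.Dict.empty).contains x = true := by
  rw [mem_uKeys] at h
  obtain ⟨d, hd, hx⟩ := h
  obtain ⟨j, hj, rfl⟩ := List.mem_iff_getElem.1 hd
  refine ⟨j, hj, ?_⟩
  rw [List.getD_eq_getElem?_getD, List.getElem?_eq_getElem hj]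
  exact (PySem.Dict.contains_iff_mem_keys _ x).2 hx

theorem nodup0 (ds0 : List (PySem.Dict String Int))
    (h0 : ∀ d ∈ ds0, d.keys.Nodup) (j : Nat) : (ds0.getD j PySem.Dict.empty).keys.Nodup := by
  by_cases hj : j < ds0.length
  · rw [List.getD_eq_getElem?_getD, List.getElem?_eq_getElem hj]
    exact h0 _ (List.getElem_mem hj)
  · rw [List.getD_eq_getElem?_getD, List.getElem?_eq_none (by omega)]
    simp [PySem.Dict.empty, PySem.Dict.keys]

theorem fillSpec_isSome (d : PySem.Dict String Int) (U : List String) (x : String)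
    (hsub : d.contains x = true → x ∈ U) :
    (fillSpec d U x).isSome = decide (x ∈ U) := by
  unfold fillSpec
  by_cases hc : d.contains x = true
  · rw [if_pos hc, decide_eq_true (hsub hc), PySem.Dict.contains_eq_isSome_get?] at *
    exact hc
  · rw [if_neg hc]
    by_cases hU : x ∈ U
    · simp [hU]
    · simp [hU]

-- the outer loop: positions < m are filled, positions ≥ m untouched; rows out so far
theorem outer_loop (ds0 : List (PySem.Dict String Int)) (h0 : ∀ d ∈ ds0, d.keys.Nodup)
    (c : Nat) : ∀ (m : Nat) (ds : List (PySem.Dict String Int)) (out : List (List (String × Int))),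
    m + c = ds0.length →
    ds.length = ds0.length →
    (∀ j, m ≤ j → ds.getD j PySem.Dict.empty = ds0.getD j PySem.Dict.empty) →
    (∀ j, j < m → (ds.getD j PySem.Dict.empty).keys.Nodup ∧
        ∀ x, (ds.getD j PySem.Dict.empty).get? x = fillSpec (ds0.getD j PySem.Dict.empty) (uKeys ds0) x) →
    ((List.range' m c).foldl (stepA ds0.length) (ds, out)).2
      = out ++ ((ds0.drop m).map (rowSpec (uKeys ds0))) := by
  induction c with
  | zero =>
    intro m ds out hmc _ _ _
    have : m = ds0.length := by omega
    subst this
    simp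
  | succ c ih =>
    intro m ds out hmc hlen hge hlt
    have hmn : m < ds0.length := by omega
    rw [List.range'_succ, List.foldl_cons]
    -- the starting target is the untouched original dict m
    have ht0 : ds.getD m PySem.Dict.empty = ds0.getD m PySem.Dict.empty := hge m le_rfl
    -- every current dict's keys lie in U
    have hsubU : ∀ j x, (ds.getD j PySem.Dict.empty).contains x = true → x ∈ uKeys ds0 := by
      intro j x hx
      by_cases hj : j < m
      · obtain ⟨hnd, hg⟩ := hlt j hj
        rw [PySem.Dict.contains_eq_isSome_get?, hg x] at hx
        unfold fillSpec at hx
        by_cases hc : (ds0.getD j PySem.Dict.empty).contains x = true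
        · exact contains0_mem_uKeys ds0 j x hc
        · rw [if_neg hc] at hx
          by_cases hU : x ∈ uKeys ds0
          · exact hU
          · rw [if_neg hU] at hx; simp at hx
      · rw [hge j (by omega)] at hx
        exact contains0_mem_uKeys ds0 j x hx
    -- the inner loop, specified
    obtain ⟨hTn, hTg⟩ := inner_loop ds m (List.range ds0.length) (ds.getD m PySem.Dict.empty)
      (by rw [ht0]; exact nodup0 ds0 h0 m)
    set T := (List.range ds0.length).foldl
      (fun t j => fillFrom t (if j = m then t else ds.getD j PySem.Dict.empty))
      (ds.getD m PySem.Dict.empty) with hT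
    have hTspec : ∀ x, T.get? x = fillSpec (ds0.getD m PySem.Dict.empty) (uKeys ds0) x := by
      intro x
      rw [hTg x, ht0]
      unfold fillSpec
      by_cases h1 : (ds0.getD m PySem.Dict.empty).contains x = true
      · rw [if_pos h1, if_pos h1]
      · rw [if_neg h1, if_neg h1]
        congr 1
        rw [eq_iff_iff, List.any_eq_true]
        constructor
        · rintro ⟨j, _, hj⟩
          rw [Bool.and_eq_true] at hj
          exact hsubU j x hj.2
        · intro hU
          obtain ⟨j, hjn, hj⟩ := exists_contains0_of_mem_uKeys ds0 x hU
          have hjm : j ≠ m := by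
            rintro rfl
            exact h1 hj
          refine ⟨j, List.mem_range.2 hjn, ?_⟩
          rw [Bool.and_eq_true, decide_eq_true hjm]
          refine ⟨rfl, ?_⟩
          by_cases hjlt : j < m
          · obtain ⟨_, hg⟩ := hlt j hjlt
            rw [PySem.Dict.contains_eq_isSome_get?, hg x]
            rw [fillSpec_isSome _ _ _ (fun hc => contains0_mem_uKeys ds0 j x hc)]
            exact decide_eq_true hU
          · rw [hge j (by omega)]
            exact hj
    have hTmem : ∀ x, T.contains x = true ↔ x ∈ uKeys ds0 := by
      intro x
      rw [PySem.Dict.contains_eq_isSome_get?, hTspec x,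
        fillSpec_isSome _ _ _ (fun hc => contains0_mem_uKeys ds0 m x hc)]
      simp
    -- the appended row is B's row for dict m
    have hrow : PySem.List.sorted T.items (fun p => p.1) true
        = rowSpec (uKeys ds0) (ds0.getD m PySem.Dict.empty) :=
      row_eq (uKeys ds0) (nodup_uKeys ds0) T _ hTn hTmem hTspec
    -- one step of the fold
    have hstep : stepA ds0.length (ds, out) m
        = (ds.set m T, out ++ [PySem.List.sorted T.items (fun x => x.1) true]) := rfl
    rw [hstep, hrow]
    rw [ih (m + 1) (ds.set m T) _ (by omega) (by rw [List.length_set, hlen])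
      (fun j hj => by
        rw [List.getD_eq_getElem?_getD, List.getElem?_set_ne (by omega),
          ← List.getD_eq_getElem?_getD]
        exact hge j (by omega))
      (fun j hj => by
        by_cases hjm : j = m
        · subst hjm
          rw [List.getD_eq_getElem?_getD, List.getElem?_set_self (by omega), Option.getD_some]
          exact ⟨hTn, hTspec⟩
        · rw [List.getD_eq_getElem?_getD, List.getElem?_set_ne (fun h => hjm h.symm),
            ← List.getD_eq_getElem?_getD]
          exact hlt j (by omega))]
    rw [List.drop_eq_getElem_cons hmn, List.map_cons, List.append_assoc, List.singleton_append]
    congr 2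
    rw [List.getD_eq_getElem?_getD, List.getElem?_eq_getElem hmn, Option.getD_some]

theorem a_eq (lod : List (List (String × Int))) :
    fill_dicts lod =
      (lod.map (fun l => PySem.Dict.ofList l)).map
        (rowSpec (uKeys (lod.map (fun l => PySem.Dict.ofList l)))) := by
  show (((List.range (lod.map (fun l => PySem.Dict.ofList l)).length).foldl
      (stepA (lod.map (fun l => PySem.Dict.ofList l)).length)
      ((lod.map (fun l => PySem.Dict.ofList l)), [])).2) = _
  rw [List.range_eq_range']
  rw [outer_loop (lod.map (fun l => PySem.Dict.ofList l))
    (fun d hd => by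
      obtain ⟨l, _, rfl⟩ := List.mem_map.1 hd
      exact PySem.Dict.nodup_keys_ofList l)
    (lod.map (fun l => PySem.Dict.ofList l)).length 0 _ [] (by omega) rfl
    (fun j _ => rfl) (fun j hj => absurd hj (by omega))]
  simp

theorem alt_eq (lod : List (List (String × Int))) :
    fill_dicts_alt lod =
      (lod.map (fun l => PySem.Dict.ofList l)).map
        (rowSpec (uKeys (lod.map (fun l => PySem.Dict.ofList l)))) := by
  show (lod.map (fun l => PySem.Dict.ofList l)).foldl
      (fun (out : List (List (String × Int))) d =>
        out ++ [(PySem.List.sorted (uKeys (lod.map (fun l => PySem.Dict.ofList l))) (fun k => k) true).map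
          (fun k => (k, ((PySem.List.sorted (uKeys (lod.map (fun l => PySem.Dict.ofList l))) (fun k => k) true).foldl
            (fun d k => if d.contains k then d else d.insert k 0) d).getD k 0))]) [] = _
  simp only [PySem.List.foldl_append_singleton_eq_map]
  rw [List.nil_append]
  apply List.map_congr_left
  intro d _
  unfold rowSpec
  apply List.map_congr_left
  intro k _
  rw [PySem.Dict.getD_eq_get?_getD, fillKeys_get?]
  by_cases hc : d.contains k = true
  · rw [if_pos hc, if_pos hc, PySem.Dict.getD_eq_get?_getD]
  · rw [if_neg hc, if_neg hc]
    split <;> rfl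

-- ===== VERDICT (by name: the statement is the Claim_ definition above) =====
theorem fill_dicts_spec : Claim_equal_fill_dicts := by
  intro lod _
  unfold Spec_fill_dicts
  rw [a_eq, alt_eq]
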